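-- pv_equiv track=rewrite | github.com/38/grass | pygrass/pygrass/file_format.py | detect_uncompressed_text_format
-- ===== SOURCE A (Python) =====
-- def detect_uncompressed_text_format(reader, arg_bag = None) -> str:
--     """
--     Detect the file format of the given uncompressed text file.
--     """
--     detected_category = "none"
--     for line in reader:
--         if type(line) != str:
--             line = line.decode("utf8")
--         if detected_category == "none":
--             if line.startswith("##fileformat=VCF"):
--                 return "vcf"
--             elif line.startswith("#"):
--                 detected_category = "bed"
--             elif line.startswith(":") or line.startswith(">"):
--                 detected_category = "fasta"
--             elif line.startswith("@"):
--                 detected_category = "sam"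
--             else:
--                 detected_category = "bed"
--         if detected_category != "bed":
--             return detected_category
--         if not line.startswith("#"):
--             if arg_bag != None:
--                 arg_bag["num_of_fields"] = len(line.split("\t"))
--             return detected_category
--     return "unknown"
-- ===== SOURCE B (Python) =====
-- _PREFIX_TABLE = (("vcf", "##fileformat=VCF"), ("fasta", (":", ">")), ("sam", "@"))
--
--
-- def detect_uncompressed_text_format(reader, arg_bag=None) -> str:
--     """Detect the file format of the given uncompressed text file."""
--     lines = [x if type(x) == str else x.decode("utf8") for x in reader]
--     if not lines:
--         return "unknown"
--     first = lines[0]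
--     for fmt, prefixes in _PREFIX_TABLE:
--         if first.startswith(prefixes):
--             return fmt
--     data = next((l for l in lines if not l.startswith("#")), None)
--     if data is None:
--         return "unknown"
--     if arg_bag is not None:
--         arg_bag["num_of_fields"] = len(data.split("\t"))
--     return "bed"
-- ===== Notes on version B (the rewrite author's own statement) =====
-- stated objective: alternative
-- what changed: B materialises the decoded lines once, dispatches the format via a declarative prefix table (using tuple-argument startswith), and finds the bed data line with a filtered generator expression, instead of A's single streaming loop threaded through a 'detected_category' state variable.
import Mathlib
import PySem

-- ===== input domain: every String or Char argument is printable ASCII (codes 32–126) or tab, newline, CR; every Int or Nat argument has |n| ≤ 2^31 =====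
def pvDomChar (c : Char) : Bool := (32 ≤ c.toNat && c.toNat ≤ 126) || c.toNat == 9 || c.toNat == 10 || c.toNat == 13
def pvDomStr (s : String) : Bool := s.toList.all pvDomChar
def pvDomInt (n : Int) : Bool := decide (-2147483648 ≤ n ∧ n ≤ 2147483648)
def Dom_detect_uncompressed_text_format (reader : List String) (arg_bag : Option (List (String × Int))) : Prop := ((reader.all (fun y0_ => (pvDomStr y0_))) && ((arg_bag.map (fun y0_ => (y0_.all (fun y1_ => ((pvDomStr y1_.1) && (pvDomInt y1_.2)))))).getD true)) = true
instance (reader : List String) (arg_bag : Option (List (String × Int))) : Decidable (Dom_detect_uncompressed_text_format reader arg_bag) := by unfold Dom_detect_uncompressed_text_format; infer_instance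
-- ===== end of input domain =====

-- B materialises the lines once, dispatches via a prefix table and finds the bed data line with a
-- filtered first-match; objective: alternative (same cost, declarative shape).
-- Note: the Python programs also write arg_bag["num_of_fields"] (identically in A and B), and B
-- consumes the whole reader iterator where A may stop early; only the RETURN value is proved here.

-- ===== PORT A =====
-- A's single for-loop with its detected_category state variable; early returns become results.
def pvALoop (lines : List String) (cat0 : String) : String :=
  match lines with
  | [] => "unknown"
  | line :: rest =>
    if cat0 == "none" && PySem.Str.startswith line "##fileformat=VCF" then "vcf"
    else
      let cat :=
        if cat0 == "none" then
          if PySem.Str.startswith line "#" then "bed"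
          else if PySem.Str.startswith line ":" || PySem.Str.startswith line ">" then "fasta"
          else if PySem.Str.startswith line "@" then "sam"
          else "bed"
        else cat0
      if cat != "bed" then cat
      else if !(PySem.Str.startswith line "#") then cat
      else pvALoop rest cat

def detect_uncompressed_text_format (reader : List String) (arg_bag : Option (List (String × Int))) : String :=
  pvALoop reader "none"

-- ===== PORT B =====
-- Source B's prefix table (tuple-argument startswith = any of the listed prefixes).
def pvPrefixTable : List (String × List String) :=
  [("vcf", ["##fileformat=VCF"]), ("fasta", [":", ">"]), ("sam", ["@"])]

-- Source B's for-loop over the table: first format whose prefix matches the first line.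
def pvDispatch (tbl : List (String × List String)) (first : String) : Option String :=
  match tbl with
  | [] => none
  | (fmt, ps) :: rest =>
    if ps.any (fun p => PySem.Str.startswith first p) then some fmt else pvDispatch rest first

def detect_uncompressed_text_format_alt (reader : List String) (arg_bag : Option (List (String × Int))) : String :=
  match reader with
  | [] => "unknown"
  | first :: _ =>
    match pvDispatch pvPrefixTable first with
    | some fmt => fmt
    | none =>
      -- next((l for l in lines if not l.startswith("#")), None)
      match reader.find? (fun l => !(PySem.Str.startswith l "#")) with
      | some _ => "bed"
      | none => "unknown"

-- ===== PRECONDITION & SPEC =====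
def Spec_detect_uncompressed_text_format (reader : List String) (arg_bag : Option (List (String × Int))) (out : String) : Prop := out = detect_uncompressed_text_format_alt reader arg_bag
instance (reader : List String) (arg_bag : Option (List (String × Int))) (out : String) : Decidable (Spec_detect_uncompressed_text_format reader arg_bag out) := by unfold Spec_detect_uncompressed_text_format; infer_instance

-- ===== CLAIM (what is proved, stated in full; the proofs are below) =====
def Claim_equal_detect_uncompressed_text_format : Prop := ∀ (reader : List String) (arg_bag : Option (List (String × Int))), Dom_detect_uncompressed_text_format reader arg_bag → Spec_detect_uncompressed_text_format reader arg_bag (detect_uncompressed_text_format reader arg_bag)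

-- ===== LEMMAS AND PROOFS =====

-- Once the category is "bed", A's loop returns "bed" at the first non-'#' line, i.e. B's filtered
-- first-match is some, and "unknown" otherwise.
theorem pvALoop_bed (lines : List String) :
    pvALoop lines "bed" =
      (match lines.find? (fun l => !(PySem.Str.startswith l "#")) with
       | some _ => "bed" | none => "unknown") := by
  induction lines with
  | nil => rfl
  | cons l rest ih =>
    simp only [pvALoop, List.find?]
    cases h : PySem.Str.startswith l "#" <;> simp_all

-- Distinct one-character prefixes are mutually exclusive.
theorem startswith_hash_excl (l : List Char) (c : Char) (hc : c ≠ '#') :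
    PySem.Chars.startswith l ['#'] = true → PySem.Chars.startswith l [c] = false := by
  simp only [PySem.Chars.startswith_iff]
  intro h
  rw [Bool.eq_false_iff]
  intro hp
  rw [PySem.Chars.startswith_iff] at hp
  obtain ⟨t1, e1⟩ := h
  obtain ⟨t2, e2⟩ := hp
  have e3 : c :: t2 = '#' :: t1 := e2.trans e1.symm
  injection e3 with h _
  exact hc h

-- ===== VERDICT (by name: the statement is the Claim_ definition above) =====
theorem detect_uncompressed_text_format_spec : Claim_equal_detect_uncompressed_text_format := by
  intro reader arg_bag _
  unfold Spec_detect_uncompressed_text_format detect_uncompressed_text_format detect_uncompressed_text_format_alt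
  cases reader with
  | nil => rfl
  | cons first rest =>
    simp only [pvALoop, pvDispatch, pvPrefixTable, List.any, List.find?,
      PySem.Str.startswith_eq]
    by_cases hv : PySem.Chars.startswith first.toList ['#', '#', 'f', 'i', 'l', 'e', 'f', 'o', 'r', 'm', 'a', 't', '=', 'V', 'C', 'F'] = true
    · simp [hv]
    · by_cases hh : PySem.Chars.startswith first.toList ['#'] = true
      · have h1 := startswith_hash_excl first.toList ':' (by decide) hh
        have h2 := startswith_hash_excl first.toList '>' (by decide) hh
        have h3 := startswith_hash_excl first.toList '@' (by decide) hh
        simp [hv, hh, h1, h2, h3, pvALoop_bed, PySem.Str.startswith_eq]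
      · by_cases hf : (PySem.Chars.startswith first.toList [':'] = true ∨ PySem.Chars.startswith first.toList ['>'] = true)
        · rcases hf with hf | hf <;> simp [hv, hh, hf]
        · push Not at hf
          by_cases hs : PySem.Chars.startswith first.toList ['@'] = true
          · simp [hv, hh, hf.1, hf.2, hs]
          · simp [hv, hh, hf.1, hf.2, hs]
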